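-- pv_equiv track=rewrite | github.com/chulsea/TIL | algorithm/Python/algorithm/problems/donut.py | solution
-- ===== SOURCE A (Python) =====
-- def __cal_donut(arr, k, x, y):
--     sum_donut = 0
--     m = 0
--     ny, nx = y, x
--     dx = [1, 0, -1, 0]
--     dy = [0, 1, 0, -1]
--     for i in range(1, k*4-3):
--         ny += dy[m]
--         nx += dx[m]
--         sum_donut += arr[ny][nx]
--         if i % (k - 1) == 0:
--             m += 1
--     return sum_donut
--
-- def solution(arr, k):
--     n = len(arr)
--     max_donut = 0
--     for y in range(n-k+1):
--         for x in range(n-k+1):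
--             my = y + k - 1
--             mx = x + k - 1
--             if 0 <= my < n and 0 <= mx < n:
--                 sum_donut = __cal_donut(arr, k, x, y)
--                 max_donut = max(max_donut, sum_donut)
--     return max_donut
-- ===== SOURCE B (Python) =====
-- def solution(arr, k):
--     n = len(arr)
--     if k < 2 or k > n:
--         return 0
--     # row prefix sums: rp[y][j] = sum(arr[y][0:j]) for j in 0..n
--     rp = []
--     for y in range(n):
--         acc = [0]
--         for j in range(n):
--             acc.append(acc[-1] + arr[y][j])
--         rp.append(acc)
--     # column prefix sums: cp[x][i] = sum(arr[t][x] for t in 0..i-1)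
--     cp = []
--     for x in range(n):
--         acc = [0]
--         for y in range(n):
--             acc.append(acc[-1] + arr[y][x])
--         cp.append(acc)
--     best = 0
--     for y in range(n - k + 1):
--         for x in range(n - k + 1):
--             s = (rp[y][x + k] - rp[y][x]
--                  + rp[y + k - 1][x + k] - rp[y + k - 1][x]
--                  + cp[x][y + k - 1] - cp[x][y + 1]
--                  + cp[x + k - 1][y + k - 1] - cp[x + k - 1][y + 1])
--             best = max(best, s)
--     return best
-- ===== Notes on version B (the rewrite author's own statement) =====
-- stated objective: alternative
-- what changed: Instead of walking the 4k-4 border cells of every k-by-k donut with a direction table and modulus-driven turns, B precomputes row and column prefix sums once and evaluates each donut border as eight prefix-sum lookups in O(1) per donut.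
import Mathlib
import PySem

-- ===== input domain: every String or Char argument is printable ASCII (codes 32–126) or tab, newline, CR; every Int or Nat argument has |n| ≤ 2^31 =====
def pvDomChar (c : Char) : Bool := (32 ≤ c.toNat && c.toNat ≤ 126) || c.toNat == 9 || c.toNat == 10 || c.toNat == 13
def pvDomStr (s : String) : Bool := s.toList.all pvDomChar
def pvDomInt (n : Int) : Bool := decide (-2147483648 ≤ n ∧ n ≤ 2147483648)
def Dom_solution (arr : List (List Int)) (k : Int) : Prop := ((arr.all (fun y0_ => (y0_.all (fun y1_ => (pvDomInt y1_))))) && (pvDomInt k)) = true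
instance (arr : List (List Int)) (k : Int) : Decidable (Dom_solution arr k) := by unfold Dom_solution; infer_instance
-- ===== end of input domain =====

-- B replaces A's direction-table border walk (O(k) per donut) by row/column prefix sums with
-- O(1) lookups per donut; equivalence is about the return value, neither version mutates its input.

-- ===== PORT A =====
-- one loop iteration of A's __cal_donut: state (sum_donut, m, ny, nx)
def donutStep (arr : List (List Int)) (k : Int)
    (st : Int × Int × Int × Int) (i : Int) : Int × Int × Int × Int :=
  let dx : List Int := [1, 0, -1, 0]
  let dy : List Int := [0, 1, 0, -1]
  let ny := st.2.2.1 + PySem.List.pyGetD dy st.2.1 0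
  let nx := st.2.2.2 + PySem.List.pyGetD dx st.2.1 0
  let s := st.1 + PySem.List.pyGetD (PySem.List.pyGetD arr ny []) nx 0
  let m := if PySem.Int.mod i (k - 1) = 0 then st.2.1 + 1 else st.2.1
  (s, m, ny, nx)

-- A's __cal_donut
def calDonut (arr : List (List Int)) (k x y : Int) : Int :=
  ((PySem.List.pyRange 1 (k * 4 - 3) 1).foldl (donutStep arr k) (0, 0, y, x)).1

def solution (arr : List (List Int)) (k : Int) : Int :=
  let n : Int := arr.length
  (PySem.List.pyRange 0 (n - k + 1) 1).foldl (fun maxD y =>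
    (PySem.List.pyRange 0 (n - k + 1) 1).foldl (fun maxD x =>
      let my := y + k - 1
      let mx := x + k - 1
      if 0 ≤ my ∧ my < n ∧ 0 ≤ mx ∧ mx < n then
        max maxD (calDonut arr k x y)
      else maxD) maxD) 0

-- ===== PORT B =====
def solution_alt (arr : List (List Int)) (k : Int) : Int :=
  let n : Int := arr.length
  if k < 2 ∨ n < k then 0
  else
    -- rp[y][j] = sum(arr[y][0:j])
    let rp : List (List Int) := (PySem.List.pyRange 0 n 1).foldl (fun rp y =>
      rp ++ [(PySem.List.pyRange 0 n 1).foldl (fun acc j =>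
        acc ++ [PySem.List.pyGetD acc (-1) 0
                + PySem.List.pyGetD (PySem.List.pyGetD arr y []) j 0]) [0]]) []
    -- cp[x][i] = sum(arr[t][x] for t in range(i))
    let cp : List (List Int) := (PySem.List.pyRange 0 n 1).foldl (fun cp x =>
      cp ++ [(PySem.List.pyRange 0 n 1).foldl (fun acc y =>
        acc ++ [PySem.List.pyGetD acc (-1) 0
                + PySem.List.pyGetD (PySem.List.pyGetD arr y []) x 0]) [0]]) []
    (PySem.List.pyRange 0 (n - k + 1) 1).foldl (fun best y =>
      (PySem.List.pyRange 0 (n - k + 1) 1).foldl (fun best x =>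
        let s := PySem.List.pyGetD (PySem.List.pyGetD rp y []) (x + k) 0
               - PySem.List.pyGetD (PySem.List.pyGetD rp y []) x 0
               + PySem.List.pyGetD (PySem.List.pyGetD rp (y + k - 1) []) (x + k) 0
               - PySem.List.pyGetD (PySem.List.pyGetD rp (y + k - 1) []) x 0
               + PySem.List.pyGetD (PySem.List.pyGetD cp x []) (y + k - 1) 0
               - PySem.List.pyGetD (PySem.List.pyGetD cp x []) (y + 1) 0
               + PySem.List.pyGetD (PySem.List.pyGetD cp (x + k - 1) []) (y + k - 1) 0
               - PySem.List.pyGetD (PySem.List.pyGetD cp (x + k - 1) []) (y + 1) 0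
        max best s) best) 0

-- ===== PRECONDITION & SPEC =====
-- Pre_ excludes exactly the inputs where A raises IndexError: when 2 ≤ k ≤ len(arr),
-- A indexes every row at columns up to len(arr)-1, so every row must have at least len(arr) entries.
def Pre_solution (arr : List (List Int)) (k : Int) : Prop :=
  (2 ≤ k ∧ k ≤ (arr.length : Int)) → ∀ row ∈ arr, arr.length ≤ row.length
instance (arr : List (List Int)) (k : Int) : Decidable (Pre_solution arr k) := by
  unfold Pre_solution; infer_instance

def pvWitness_solution : List (List Int) × Int := ([[1, 2], [3, 4]], 2)

def Spec_solution (arr : List (List Int)) (k : Int) (out : Int) : Prop := out = solution_alt arr k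
instance (arr : List (List Int)) (k : Int) (out : Int) : Decidable (Spec_solution arr k out) := by
  unfold Spec_solution; infer_instance

-- ===== CLAIM (what is proved, stated in full; the proofs are below) =====
def Claim_equal_solution : Prop := ∀ (arr : List (List Int)) (k : Int),
  Dom_solution arr k → Pre_solution arr k → Spec_solution arr k (solution arr k)

-- ===== LEMMAS AND PROOFS =====

-- cell lookup both ports use, with Python's raising [] replaced by the (never-hit) default 0
def pvG (arr : List (List Int)) (r c : Int) : Int :=
  PySem.List.pyGetD (PySem.List.pyGetD arr r []) c 0

def pvDY (m : Int) : Int := PySem.List.pyGetD ([0, 1, 0, -1] : List Int) m 0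
def pvDX (m : Int) : Int := PySem.List.pyGetD ([1, 0, -1, 0] : List Int) m 0

-- sum of a horizontal / vertical segment of j cells starting at the given cell
def segRow (arr : List (List Int)) (r a : Int) (j : Nat) : Int :=
  ∑ t ∈ Finset.range j, pvG arr r (a + (t : Int))
def segCol (arr : List (List Int)) (c a : Int) (j : Nat) : Int :=
  ∑ t ∈ Finset.range j, pvG arr (a + (t : Int)) c

-- prefix sums of f over 0..t-1
def pvPL (f : Int → Int) (t : Nat) : Int := ∑ u ∈ Finset.range t, f (u : Int)

lemma runNoSwitch (arr : List (List Int)) (k : Int) (j : Nat) :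
    ∀ (a S m ny nx : Int),
      (∀ t : Nat, t < j → PySem.Int.mod (a + (t : Int)) (k - 1) ≠ 0) →
      (PySem.List.pyRange a (a + (j : Int)) 1).foldl (donutStep arr k) (S, m, ny, nx)
      = (S + ∑ t ∈ Finset.range j,
            pvG arr (ny + ((t : Int) + 1) * pvDY m) (nx + ((t : Int) + 1) * pvDX m),
         m, ny + (j : Int) * pvDY m, nx + (j : Int) * pvDX m) := by
  induction j with
  | zero =>
    intro a S m ny nx _
    rw [PySem.List.pyRange_one_eq_nil (by simp)]
    simp
  | succ j ih =>
    intro a S m ny nx h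
    rw [PySem.List.pyRange_one_cons (by push_cast; omega)]
    rw [List.foldl_cons]
    have h0 : PySem.Int.mod a (k - 1) ≠ 0 := by
      have := h 0 (by omega); simpa using this
    have hstep : donutStep arr k (S, m, ny, nx) a
        = (S + pvG arr (ny + pvDY m) (nx + pvDX m), m, ny + pvDY m, nx + pvDX m) := by
      simp [donutStep, pvG, pvDY, pvDX, h0]
    rw [hstep]
    rw [show a + ((j + 1 : Nat) : Int) = (a + 1) + (j : Int) by push_cast; ring]
    rw [ih (a + 1) _ m _ _ (by
      intro t ht
      have := h (t + 1) (by omega)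
      rw [show a + ((t + 1 : Nat) : Int) = a + 1 + (t : Int) by push_cast; ring] at this
      exact this)]
    refine Prod.ext ?_ (Prod.ext rfl (Prod.ext ?_ ?_)) <;> simp only
    · rw [Finset.sum_range_succ']
      push_cast
      ring_nf
    · push_cast; ring
    · push_cast; ring

lemma pvDY_def (m : Int) : PySem.List.pyGetD ([0, 1, 0, -1] : List Int) m 0 = pvDY m := rfl

lemma pvDX_def (m : Int) : PySem.List.pyGetD ([1, 0, -1, 0] : List Int) m 0 = pvDX m := rfl

lemma pvG_def (arr : List (List Int)) (r c : Int) :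
    PySem.List.pyGetD (PySem.List.pyGetD arr r []) c 0 = pvG arr r c := rfl

lemma pvG_congr (arr : List (List Int)) {a b a' b' : Int} (h1 : a = a') (h2 : b = b') :
    pvG arr a b = pvG arr a' b' := by rw [h1, h2]

lemma segRun (arr : List (List Int)) (k : Int) (hk : 2 ≤ k)
    (c S m ny nx : Int) (hc : (k - 1) ∣ c) :
    (PySem.List.pyRange (c + 1) (c + (k - 1) + 1) 1).foldl (donutStep arr k) (S, m, ny, nx)
    = (S + ∑ t ∈ Finset.range (k - 1).toNat,
          pvG arr (ny + ((t : Int) + 1) * pvDY m) (nx + ((t : Int) + 1) * pvDX m),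
       m + 1, ny + (k - 1) * pvDY m, nx + (k - 1) * pvDX m) := by
  have hd : 1 ≤ k - 1 := by omega
  rw [PySem.List.pyRange_one_succ_right (by omega), List.foldl_append]
  have hcast : ((k - 2).toNat : Int) = k - 2 := by omega
  rw [show c + (k - 1) = (c + 1) + ((k - 2).toNat : Int) by omega]
  rw [runNoSwitch arr k (k - 2).toNat (c + 1) S m ny nx (by
    intro t ht hmod
    rw [PySem.Int.mod_eq_zero_iff_dvd] at hmod
    have h2 : (k - 1) ∣ (1 + (t : Int)) := by
      have h5 := Int.dvd_sub hmod hc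
      rw [show c + 1 + (t : Int) - c = 1 + t by ring] at h5
      exact h5
    have h3 : (1 : Int) + t ≤ k - 2 := by omega
    have h4 : k - 1 ≤ 1 + (t : Int) := Int.le_of_dvd (by omega) h2
    omega)]
  have hlast : PySem.Int.mod (c + 1 + ((k - 2).toNat : Int)) (k - 1) = 0 := by
    rw [PySem.Int.mod_eq_zero_iff_dvd, hcast,
        show c + 1 + (k - 2) = c + (k - 1) by ring]
    exact Int.dvd_add hc (dvd_refl (k - 1))
  rw [List.foldl_cons, List.foldl_nil]
  simp only [donutStep, pvDY_def, pvDX_def, pvG_def, hlast, if_pos]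
  rw [show (k - 1).toNat = (k - 2).toNat + 1 by omega, Finset.sum_range_succ, hcast]
  simp only [Prod.mk.injEq]
  refine ⟨?_, trivial, by ring, by ring⟩
  rw [show ny + (k - 2) * pvDY m + pvDY m = ny + (k - 2 + 1) * pvDY m by ring,
      show nx + (k - 2) * pvDX m + pvDX m = nx + (k - 2 + 1) * pvDX m by ring, ← add_assoc]

lemma calDonut_eq (arr : List (List Int)) (k x y : Int) (hk : 2 ≤ k) :
    calDonut arr k x y
    = segRow arr y (x + 1) (k - 1).toNat + segCol arr (x + (k - 1)) (y + 1) (k - 1).toNat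
      + segRow arr (y + (k - 1)) x (k - 1).toNat + segCol arr x y (k - 1).toNat := by
  have dy0 : pvDY 0 = 0 := by decide
  have dx0 : pvDX 0 = 1 := by decide
  have dy1 : pvDY 1 = 1 := by decide
  have dx1 : pvDX 1 = 0 := by decide
  have dy2 : pvDY 2 = 0 := by decide
  have dx2 : pvDX 2 = -1 := by decide
  have dy3 : pvDY 3 = -1 := by decide
  have dx3 : pvDX 3 = 0 := by decide
  have hd : ((k - 1).toNat : Int) = k - 1 := by omega
  have t0 : (PySem.List.pyRange 1 k 1).foldl (donutStep arr k) (0, 0, y, x)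
      = (segRow arr y (x + 1) (k - 1).toNat, 1, y, x + (k - 1)) := by
    have s := segRun arr k hk 0 0 0 y x (dvd_zero _)
    rw [show (0:Int) + 1 = 1 by ring, show (0:Int) + (k - 1) + 1 = k by ring,
        dy0, dx0, zero_add,
        show y + (k - 1) * (0:Int) = y by ring,
        show x + (k - 1) * (1:Int) = x + (k - 1) by ring] at s
    rw [s, segRow]
    exact congrArg (fun z => (z, (1:Int), y, x + (k - 1)))
      (Finset.sum_congr rfl fun t _ => pvG_congr arr (by ring) (by ring))
  have t1 : ∀ S, (PySem.List.pyRange k (2*k - 1) 1).foldl (donutStep arr k) (S, 1, y, x + (k - 1))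
      = (S + segCol arr (x + (k - 1)) (y + 1) (k - 1).toNat, 2, y + (k - 1), x + (k - 1)) := by
    intro S
    have s := segRun arr k hk (k - 1) S 1 y (x + (k - 1)) (dvd_refl _)
    rw [show (k - 1) + 1 = k by ring, show (k - 1) + (k - 1) + 1 = 2*k - 1 by ring,
        dy1, dx1,
        show y + (k - 1) * (1:Int) = y + (k - 1) by ring,
        show x + (k - 1) + (k - 1) * (0:Int) = x + (k - 1) by ring,
        show (1:Int) + 1 = 2 by ring] at s
    rw [s, segCol]
    exact congrArg (fun z => (S + z, (2:Int), y + (k - 1), x + (k - 1)))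
      (Finset.sum_congr rfl fun t _ => pvG_congr arr (by ring) (by ring))
  have t2 : ∀ S, (PySem.List.pyRange (2*k - 1) (3*k - 2) 1).foldl (donutStep arr k)
        (S, 2, y + (k - 1), x + (k - 1))
      = (S + segRow arr (y + (k - 1)) x (k - 1).toNat, 3, y + (k - 1), x) := by
    intro S
    have s := segRun arr k hk (2*(k - 1)) S 2 (y + (k - 1)) (x + (k - 1)) (dvd_mul_left _ _)
    rw [show 2*(k - 1) + 1 = 2*k - 1 by ring, show 2*(k - 1) + (k - 1) + 1 = 3*k - 2 by ring,
        dy2, dx2,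
        show y + (k - 1) + (k - 1) * (0:Int) = y + (k - 1) by ring,
        show x + (k - 1) + (k - 1) * (-1:Int) = x by ring,
        show (2:Int) + 1 = 3 by ring] at s
    rw [s, segRow]
    refine congrArg (fun z => (S + z, (3:Int), y + (k - 1), x)) ?_
    rw [Finset.sum_congr rfl (fun t ht => pvG_congr arr (a' := y + (k - 1))
          (b' := x + ((k - 1).toNat - 1 - t : Nat)) (by ring) (by
        have ht' : t < (k - 1).toNat := Finset.mem_range.mp ht
        have : (((k - 1).toNat - 1 - t : Nat) : Int) = k - 1 - 1 - t := by omega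
        rw [this]; ring))]
    exact Finset.sum_range_reflect (fun t => pvG arr (y + (k - 1)) (x + (t : Int))) _
  have t3 : ∀ S, (PySem.List.pyRange (3*k - 2) (4*k - 3) 1).foldl (donutStep arr k)
        (S, 3, y + (k - 1), x)
      = (S + segCol arr x y (k - 1).toNat, 4, y, x) := by
    intro S
    have s := segRun arr k hk (3*(k - 1)) S 3 (y + (k - 1)) x (dvd_mul_left _ _)
    rw [show 3*(k - 1) + 1 = 3*k - 2 by ring, show 3*(k - 1) + (k - 1) + 1 = 4*k - 3 by ring,
        dy3, dx3,
        show y + (k - 1) + (k - 1) * (-1:Int) = y by ring,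
        show x + (k - 1) * (0:Int) = x by ring,
        show (3:Int) + 1 = 4 by ring] at s
    rw [s, segCol]
    refine congrArg (fun z => (S + z, (4:Int), y, x)) ?_
    rw [Finset.sum_congr rfl (fun t ht => pvG_congr arr (a' := y + ((k - 1).toNat - 1 - t : Nat))
          (b' := x) (by
        have ht' : t < (k - 1).toNat := Finset.mem_range.mp ht
        have : (((k - 1).toNat - 1 - t : Nat) : Int) = k - 1 - 1 - t := by omega
        rw [this]; ring) (by ring))]
    exact Finset.sum_range_reflect (fun t => pvG arr (y + (t : Int)) x) _
  rw [calDonut, show k * 4 - 3 = 4*k - 3 by ring,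
      PySem.List.pyRange_one_append 1 k (4*k - 3) (by omega) (by omega),
      PySem.List.pyRange_one_append k (2*k - 1) (4*k - 3) (by omega) (by omega),
      PySem.List.pyRange_one_append (2*k - 1) (3*k - 2) (4*k - 3) (by omega) (by omega),
      List.foldl_append, List.foldl_append, List.foldl_append,
      t0, t1, t2, t3]

lemma foldl_zero_fixed {α : Type} (f : Int → α → Int) (l : List α)
    (h : ∀ x ∈ l, f 0 x = 0) : l.foldl f 0 = 0 := by
  induction l with
  | nil => rfl
  | cons x xs ih =>
    simp only [List.foldl_cons, h x (by simp)]
    exact ih (fun y hy => h y (by simp [hy]))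

lemma pvPL_sub (f : Int → Int) (a j : Nat) :
    pvPL f (a + j) - pvPL f a = ∑ t ∈ Finset.range j, f ((a : Int) + (t : Int)) := by
  induction j with
  | zero => simp
  | succ j ih =>
    rw [show a + (j+1) = (a+j) + 1 by omega]
    rw [pvPL, Finset.sum_range_succ, Finset.sum_range_succ, ← pvPL]
    push_cast
    rw [show ((a:Int) + j) = ((a + j : Nat) : Int) by push_cast; ring] at *
    omega

lemma getD_map_range' (g : Nat → Int) (M : Nat) (idx : Int)
    (h0 : 0 ≤ idx) (h : idx < (M : Int)) :
    PySem.List.pyGetD ((List.range M).map g) idx 0 = g idx.toNat := by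
  rw [PySem.List.pyGetD_eq_getElem _ _ h0 (by simpa using h)]
  simp [List.getElem_map, List.getElem_range]

lemma buildPrefix (f : Int → Int) (N : Nat) :
    (PySem.List.pyRange 0 (N : Int) 1).foldl
      (fun acc j => acc ++ [PySem.List.pyGetD acc (-1) 0 + f j]) [0]
    = (List.range (N + 1)).map (pvPL f) := by
  induction N with
  | zero => simp [PySem.List.pyRange_one_eq_nil, pvPL]
  | succ N ih =>
    rw [show ((N+1 : Nat) : Int) = (N : Int) + 1 by push_cast; ring,
        PySem.List.pyRange_one_succ_right (by positivity), List.foldl_append, ih]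
    rw [show List.range (N+1) = List.range N ++ [N] from List.range_succ]
    simp only [List.foldl_cons, List.foldl_nil, List.map_append, List.map_cons, List.map_nil,
      PySem.List.pyGetD_neg_one_append_singleton]
    rw [show List.range (N+1+1) = List.range (N+1) ++ [N+1] from List.range_succ,
        show List.range (N+1) = List.range N ++ [N] from List.range_succ]
    simp [pvPL, Finset.sum_range_succ]


lemma segRow_front (arr : List (List Int)) (r a : Int) (j : Nat) :
    segRow arr r a (j + 1) = pvG arr r a + segRow arr r (a + 1) j := by
  rw [segRow, Finset.sum_range_succ']
  have h : ∀ t ∈ Finset.range j, pvG arr r (a + ((t + 1 : Nat) : Int)) = pvG arr r (a + 1 + (t : Int)) :=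
    fun t _ => pvG_congr arr rfl (by push_cast; ring)
  rw [Finset.sum_congr rfl h, segRow]
  simp [add_comm]

lemma segRow_back (arr : List (List Int)) (r a : Int) (j : Nat) :
    segRow arr r a (j + 1) = segRow arr r a j + pvG arr r (a + (j : Int)) := by
  rw [segRow, Finset.sum_range_succ, segRow]

lemma segCol_front (arr : List (List Int)) (c a : Int) (j : Nat) :
    segCol arr c a (j + 1) = pvG arr a c + segCol arr c (a + 1) j := by
  rw [segCol, Finset.sum_range_succ']
  have h : ∀ t ∈ Finset.range j, pvG arr (a + ((t + 1 : Nat) : Int)) c = pvG arr (a + 1 + (t : Int)) c :=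
    fun t _ => pvG_congr arr (by push_cast; ring) rfl
  rw [Finset.sum_congr rfl h, segCol]
  simp [add_comm]

lemma segCol_back (arr : List (List Int)) (c a : Int) (j : Nat) :
    segCol arr c a (j + 1) = segCol arr c a j + pvG arr (a + (j : Int)) c := by
  rw [segCol, Finset.sum_range_succ, segCol]

lemma donut_sum_id (arr : List (List Int)) (k x y : Int) (hk : 2 ≤ k) :
    segRow arr y x k.toNat + segRow arr (y + k - 1) x k.toNat
      + segCol arr x (y + 1) (k - 2).toNat + segCol arr (x + k - 1) (y + 1) (k - 2).toNat
    = calDonut arr k x y := by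
  rw [calDonut_eq arr k x y hk]
  have h1 : k.toNat = (k - 1).toNat + 1 := by omega
  have h2 : (k - 1).toNat = (k - 2).toNat + 1 := by omega
  have e1 : segRow arr y x k.toNat = pvG arr y x + segRow arr y (x + 1) (k - 1).toNat := by
    rw [h1, segRow_front]
  have e2 : segRow arr (y + k - 1) x k.toNat
      = segRow arr (y + (k - 1)) x (k - 1).toNat + pvG arr (y + (k - 1)) (x + (k - 1)) := by
    rw [show y + k - 1 = y + (k - 1) by ring, h1, segRow_back]
    congr 1
    exact pvG_congr arr rfl (by omega)
  have e3 : segCol arr x y (k - 1).toNat = pvG arr y x + segCol arr x (y + 1) (k - 2).toNat := by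
    rw [h2, segCol_front]
  have e4 : segCol arr (x + k - 1) (y + 1) (k - 2).toNat
      = segCol arr (x + (k - 1)) (y + 1) (k - 2).toNat := by
    rw [show x + k - 1 = x + (k - 1) by ring]
  have e5 : segCol arr (x + (k - 1)) (y + 1) (k - 1).toNat
      = segCol arr (x + (k - 1)) (y + 1) (k - 2).toNat + pvG arr (y + (k - 1)) (x + (k - 1)) := by
    rw [h2, segCol_back]
    congr 1
    exact pvG_congr arr (by omega) rfl
  linarith [e1, e2, e3, e4, e5]

-- ===== VERDICT (by name: the statement is the Claim_ definition above) =====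
theorem solution_spec : Claim_equal_solution := by
  intro arr k _hDom _hPre
  show solution arr k = solution_alt arr k
  by_cases hcase : k < 2 ∨ (arr.length : Int) < k
  · have hB : solution_alt arr k = 0 := by
      simp only [solution_alt]
      rw [if_pos hcase]
    rw [hB, solution]
    rcases hcase with hk | hk
    · have hcal : ∀ x y : Int, calDonut arr k x y = 0 := by
        intro x y
        rw [calDonut, PySem.List.pyRange_one_eq_nil (by omega)]
        rfl
      apply foldl_zero_fixed
      intro y _
      apply foldl_zero_fixed
      intro x _
      simp [hcal]
    · rw [PySem.List.pyRange_one_eq_nil (by omega)]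
      rfl
  · have hk2 : 2 ≤ k := by omega
    have hkn : k ≤ (arr.length : Int) := by omega
    simp only [solution, solution_alt]
    rw [if_neg (by omega)]
    rw [PySem.List.foldl_append_singleton_eq_map
          (fun yy => (PySem.List.pyRange 0 (arr.length : Int) 1).foldl
            (fun acc j => acc ++ [PySem.List.pyGetD acc (-1) 0
              + PySem.List.pyGetD (PySem.List.pyGetD arr yy []) j 0]) [0]),
        PySem.List.foldl_append_singleton_eq_map
          (fun xx => (PySem.List.pyRange 0 (arr.length : Int) 1).foldl
            (fun acc yy => acc ++ [PySem.List.pyGetD acc (-1) 0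
              + PySem.List.pyGetD (PySem.List.pyGetD arr yy []) xx 0]) [0])]
    simp only [List.nil_append]
    have lookupRP : ∀ r idx : Int, 0 ≤ r → r < (arr.length : Int) → 0 ≤ idx → idx ≤ (arr.length : Int) →
        PySem.List.pyGetD (PySem.List.pyGetD ((PySem.List.pyRange 0 (arr.length : Int) 1).map
          (fun yy => (PySem.List.pyRange 0 (arr.length : Int) 1).foldl
            (fun acc j => acc ++ [PySem.List.pyGetD acc (-1) 0
              + PySem.List.pyGetD (PySem.List.pyGetD arr yy []) j 0]) [0])) r []) idx 0
        = pvPL (fun j => PySem.List.pyGetD (PySem.List.pyGetD arr r []) j 0) idx.toNat := by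
      intro r idx h1 h2 h3 h4
      rw [PySem.List.pyGetD_map_pyRange_of_nonneg _ _ _ _ h1 h2,
          buildPrefix (fun j => PySem.List.pyGetD (PySem.List.pyGetD arr r []) j 0) arr.length,
          getD_map_range' _ _ _ h3 (by push_cast; omega)]
    have lookupCP : ∀ r idx : Int, 0 ≤ r → r < (arr.length : Int) → 0 ≤ idx → idx ≤ (arr.length : Int) →
        PySem.List.pyGetD (PySem.List.pyGetD ((PySem.List.pyRange 0 (arr.length : Int) 1).map
          (fun xx => (PySem.List.pyRange 0 (arr.length : Int) 1).foldl
            (fun acc yy => acc ++ [PySem.List.pyGetD acc (-1) 0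
              + PySem.List.pyGetD (PySem.List.pyGetD arr yy []) xx 0]) [0])) r []) idx 0
        = pvPL (fun yy => PySem.List.pyGetD (PySem.List.pyGetD arr yy []) r 0) idx.toNat := by
      intro r idx h1 h2 h3 h4
      rw [PySem.List.pyGetD_map_pyRange_of_nonneg _ _ _ _ h1 h2,
          buildPrefix (fun yy => PySem.List.pyGetD (PySem.List.pyGetD arr yy []) r 0) arr.length,
          getD_map_range' _ _ _ h3 (by push_cast; omega)]
    refine PySem.List.foldl_congr_mem _ _ _ _ ?_
    intro acc y hy
    refine PySem.List.foldl_congr_mem _ _ _ _ ?_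
    intro acc2 x hx
    obtain ⟨hy0, hy1⟩ := PySem.List.mem_pyRange_one.mp hy
    obtain ⟨hx0, hx1⟩ := PySem.List.mem_pyRange_one.mp hx
    rw [if_pos (by omega : (0 ≤ y + k - 1 ∧ y + k - 1 < (arr.length : Int)
          ∧ 0 ≤ x + k - 1 ∧ x + k - 1 < (arr.length : Int)))]
    congr 1
    rw [lookupRP y (x + k) (by omega) (by omega) (by omega) (by omega),
        lookupRP y x (by omega) (by omega) (by omega) (by omega),
        lookupRP (y + k - 1) (x + k) (by omega) (by omega) (by omega) (by omega),
        lookupRP (y + k - 1) x (by omega) (by omega) (by omega) (by omega),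
        lookupCP x (y + k - 1) (by omega) (by omega) (by omega) (by omega),
        lookupCP x (y + 1) (by omega) (by omega) (by omega) (by omega),
        lookupCP (x + k - 1) (y + k - 1) (by omega) (by omega) (by omega) (by omega),
        lookupCP (x + k - 1) (y + 1) (by omega) (by omega) (by omega) (by omega)]
    have cRow : ∀ r : Int, pvPL (fun j => PySem.List.pyGetD (PySem.List.pyGetD arr r []) j 0) (x + k).toNat
        - pvPL (fun j => PySem.List.pyGetD (PySem.List.pyGetD arr r []) j 0) x.toNat
        = segRow arr r x k.toNat := by
      intro r
      rw [show (x + k).toNat = x.toNat + k.toNat by omega, pvPL_sub,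
          show ((x.toNat : Int)) = x by omega]
      rfl
    have cCol : ∀ r : Int, pvPL (fun yy => PySem.List.pyGetD (PySem.List.pyGetD arr yy []) r 0) (y + k - 1).toNat
        - pvPL (fun yy => PySem.List.pyGetD (PySem.List.pyGetD arr yy []) r 0) (y + 1).toNat
        = segCol arr r (y + 1) (k - 2).toNat := by
      intro r
      rw [show (y + k - 1).toNat = (y + 1).toNat + (k - 2).toNat by omega, pvPL_sub,
          show (((y + 1).toNat : Int)) = y + 1 by omega]
      rfl
    calc calDonut arr k x y
        = segRow arr y x k.toNat + segRow arr (y + k - 1) x k.toNat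
          + segCol arr x (y + 1) (k - 2).toNat + segCol arr (x + k - 1) (y + 1) (k - 2).toNat :=
          (donut_sum_id arr k x y hk2).symm
      _ = _ := by rw [← cRow y, ← cRow (y + k - 1), ← cCol x, ← cCol (x + k - 1)]; ring
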